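-- pv_equiv track=rewrite | github.com/BrianMills2718/kgas | src/nlp/result_synthesizer.py | _create_narrative_response
-- ===== SOURCE A (Python) =====
-- from typing import Dict, List, Set, Optional, Any, Tuple, Union
--
-- def _create_narrative_response(sections: List[str], question: str) -> str:
--     """Create narrative-style response"""
--
--     if not sections:
--         return "No information available."
--
--     # Add narrative connectors
--     narrative_sections = []
--
--     for i, section in enumerate(sections):
--         if i == 0:
--             narrative_sections.append(section)
--         elif i == len(sections) - 1:
--             narrative_sections.append(f"Finally, {section.lower()}")
--         else:
--             narrative_sections.append(f"Additionally, {section.lower()}")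
--
--     return " ".join(narrative_sections)
-- ===== SOURCE B (Python) =====
-- def _create_narrative_response(sections, question):
--     """Create narrative-style response"""
--     if not sections:
--         return "No information available."
--     # Walk the tail back-to-front: the first piece seen gets "Finally,", every
--     # later one "Additionally,"; separators are fused into the pieces, then one join.
--     parts = []
--     connector = " Finally, "
--     for s in reversed(sections[1:]):
--         parts.append(connector + s.lower())
--         connector = " Additionally, "
--     parts.append(sections[0])
--     parts.reverse()
--     return "".join(parts)
-- ===== Notes on version B (the rewrite author's own statement) =====
-- stated objective: alternative
-- what changed: Replaces the forward enumerate loop that tests the index on every iteration with a reverse traversal driven by a connector state variable ('Finally,' for the first piece seen from the end, then 'Additionally,'), building the pieces back-to-front with the separator fused in and finishing with a single ''.join instead of ' '.join.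
import Mathlib
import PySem

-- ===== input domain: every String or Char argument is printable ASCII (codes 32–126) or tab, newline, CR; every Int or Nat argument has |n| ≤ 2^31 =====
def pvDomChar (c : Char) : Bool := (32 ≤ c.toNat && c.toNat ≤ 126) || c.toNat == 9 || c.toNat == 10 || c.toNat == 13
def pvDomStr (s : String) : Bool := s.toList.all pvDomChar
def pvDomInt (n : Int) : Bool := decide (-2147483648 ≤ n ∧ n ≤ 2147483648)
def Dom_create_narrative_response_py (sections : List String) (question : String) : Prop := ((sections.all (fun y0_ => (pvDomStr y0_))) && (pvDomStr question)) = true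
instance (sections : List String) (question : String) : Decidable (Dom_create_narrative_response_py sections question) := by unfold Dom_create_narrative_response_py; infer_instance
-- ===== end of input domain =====

-- B replaces A's index-tested enumerate-and-' '.join loop with a reverse traversal driven by a
-- connector state variable, building the pieces back-to-front with separators fused in (alternative decomposition).


-- ===== PORT A =====
-- Port of A: enumerate loop appending an index-dependent connector to a list, then " ".join.
def create_narrative_response_py (sections : List String) (question : String) : String :=
  if sections = [] then "No information available."
  else
    let n : Int := sections.length
    let narrative := (PySem.List.enumerate sections 0).foldl
      (fun acc p =>
        if p.1 = 0 then acc ++ [p.2]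
        else if p.1 = n - 1 then acc ++ ["Finally, " ++ PySem.Str.lower p.2]
        else acc ++ ["Additionally, " ++ PySem.Str.lower p.2]) []
    PySem.Str.join " " narrative

-- ===== PORT B =====
-- Port of B: loop over reversed(sections[1:]) with state (parts, connector); connector starts
-- at " Finally, " and becomes " Additionally, " after the first piece; append sections[0],
-- reverse the pieces, and "".join them.
def create_narrative_response_py_alt (sections : List String) (question : String) : String :=
  match sections with
  | [] => "No information available."
  | head :: rest =>
    let st := rest.reverse.foldl
      (fun (st : List String × String) s =>
        (st.1 ++ [st.2 ++ PySem.Str.lower s], " Additionally, "))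
      ([], " Finally, ")
    PySem.Str.join "" ((st.1 ++ [head]).reverse)

-- ===== PRECONDITION & SPEC =====
def Spec_create_narrative_response_py (sections : List String) (question : String) (out : String) : Prop := out = create_narrative_response_py_alt sections question
instance (sections : List String) (question : String) (out : String) : Decidable (Spec_create_narrative_response_py sections question out) := by unfold Spec_create_narrative_response_py; infer_instance

-- ===== CLAIM (what is proved, stated in full; the proofs are below) =====
def Claim_equal_create_narrative_response_py : Prop := ∀ (sections : List String) (question : String), Dom_create_narrative_response_py sections question → Spec_create_narrative_response_py sections question (create_narrative_response_py sections question)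

-- ===== LEMMAS AND PROOFS =====

theorem str_join_cons_cons (x y : String) (ys : List String) :
    PySem.Str.join " " (x :: y :: ys) = x ++ " " ++ PySem.Str.join " " (y :: ys) := by
  simp only [PySem.Str.join, List.map_cons]
  rw [PySem.Chars.join_cons_cons]
  rw [String.ofList_append, String.ofList_append, String.ofList_toList]
  rfl

theorem str_join_singleton (sep : String) (x : String) : PySem.Str.join sep [x] = x := by
  simp [PySem.Str.join, PySem.Chars.join_singleton]

theorem str_join_empty_cons_cons (x y : String) (ys : List String) :
    PySem.Str.join "" (x :: y :: ys) = x ++ PySem.Str.join "" (y :: ys) := by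
  simp only [PySem.Str.join, List.map_cons]
  rw [PySem.Chars.join_cons_cons]
  simp only [show ("" : String).toList = [] from rfl, List.append_nil]
  rw [String.ofList_append, String.ofList_toList]

-- a leading prefix of the first element pulls out of a " "-join
theorem str_join_sp_prepend (p a : String) (l : List String) :
    PySem.Str.join " " ((p ++ a) :: l) = p ++ PySem.Str.join " " (a :: l) := by
  cases l with
  | nil => rw [str_join_singleton, str_join_singleton]
  | cons b bs =>
    rw [str_join_cons_cons, str_join_cons_cons, String.append_assoc, String.append_assoc,
      String.append_assoc]

-- ""-joining pieces that each carry their own leading " " equals " "-joining the bare pieces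
theorem join_fused_sep (head : String) (l : List String) :
    PySem.Str.join "" (head :: l.map (fun s => " " ++ s)) = PySem.Str.join " " (head :: l) := by
  induction l generalizing head with
  | nil => rfl
  | cons a as ih =>
    rw [List.map_cons, str_join_empty_cons_cons, ih, str_join_cons_cons, str_join_sp_prepend,
      ← String.append_assoc]

-- once the connector has become " Additionally, " it stays so, and the fold only appends pieces
theorem foldl_conn (l : List String) (acc : List String) :
    l.foldl (fun (st : List String × String) s =>
        (st.1 ++ [st.2 ++ PySem.Str.lower s], " Additionally, ")) (acc, " Additionally, ")
      = (acc ++ l.map (fun s => " Additionally, " ++ PySem.Str.lower s), " Additionally, ") := by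
  induction l generalizing acc with
  | nil => simp
  | cons a as ih => simp [ih]

-- The enumerate-indexed connector map on head :: mid ++ [z] yields head, "Additionally," mids, "Finally," z.
theorem narrative_list_eq (head : String) (mid : List String) (z : String) :
    (PySem.List.enumerate (head :: (mid ++ [z])) 0).map
      (fun p => if p.1 = 0 then p.2
        else if p.1 = ((head :: (mid ++ [z])).length : Int) - 1 then "Finally, " ++ PySem.Str.lower p.2
        else "Additionally, " ++ PySem.Str.lower p.2)
    = head :: (mid.map (fun s => "Additionally, " ++ PySem.Str.lower s)
        ++ ["Finally, " ++ PySem.Str.lower z]) := by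
  have hmid : (PySem.List.enumerate mid (0 + 1)).map
      (fun p => if p.1 = 0 then p.2
        else if p.1 = ((head :: (mid ++ [z])).length : Int) - 1 then "Finally, " ++ PySem.Str.lower p.2
        else "Additionally, " ++ PySem.Str.lower p.2)
      = mid.map (fun s => "Additionally, " ++ PySem.Str.lower s) := by
    rw [List.map_congr_left (g := fun p : Int × String => "Additionally, " ++ PySem.Str.lower p.2)
      (by
        intro p hp
        rcases (PySem.List.mem_enumerate_iff _ _ _).1 hp with ⟨k, hk, rfl⟩
        have h1 : (0 : Int) + 1 + k ≠ 0 := by omega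
        have h2 : (0 : Int) + 1 + k ≠ ((head :: (mid ++ [z])).length : Int) - 1 := by
          simp only [List.length_cons, List.length_append, List.length_nil]
          push_cast; omega
        simp only [h1, h2, if_false])]
    conv_rhs => rw [← PySem.List.map_snd_enumerate mid (0 + 1), List.map_map]
    rfl
  have hlast : ((0 : Int) + 1 + (mid.length : Int)) = ((head :: (mid ++ [z])).length : Int) - 1 := by
    simp only [List.length_cons, List.length_append, List.length_nil]
    push_cast; omega
  rw [PySem.List.enumerate_cons, PySem.List.enumerate_append, List.map_cons, List.map_append, hmid,
    PySem.List.enumerate_cons, PySem.List.enumerate_nil]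
  simp only [List.map_cons, List.map_nil, List.cons.injEq]
  refine ⟨by simp, ?_⟩
  rw [if_neg (show ¬((0 : Int) + 1 + (mid.length : Int) = 0) by omega), if_pos hlast]

-- B's reverse-traversal fold followed by "".join equals " ".join of A's connector list
theorem alt_eq_join (head : String) (mid : List String) (z : String) :
    create_narrative_response_py_alt (head :: (mid ++ [z])) ""
      = PySem.Str.join " " (head :: (mid.map (fun s => "Additionally, " ++ PySem.Str.lower s)
          ++ ["Finally, " ++ PySem.Str.lower z])) := by
  show PySem.Str.join "" _ = _
  rw [show (mid ++ [z]).reverse = z :: mid.reverse from by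
    rw [List.reverse_append, List.reverse_singleton, List.singleton_append]]
  rw [List.foldl_cons]
  simp only [List.nil_append]
  rw [foldl_conn]
  simp only [List.reverse_append, List.reverse_cons, List.reverse_nil, List.nil_append,
    List.singleton_append, List.map_reverse, List.reverse_reverse]
  have hA : (fun s => " Additionally, " ++ PySem.Str.lower s)
      = fun s => " " ++ ("Additionally, " ++ PySem.Str.lower s) := by
    funext s
    rw [← String.append_assoc]
    rfl
  have hF : (" Finally, " ++ PySem.Str.lower z)
      = " " ++ ("Finally, " ++ PySem.Str.lower z) := by
    rw [← String.append_assoc]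
    rfl
  rw [hA, hF,
    show (mid.map (fun s => " " ++ ("Additionally, " ++ PySem.Str.lower s))
        ++ [" " ++ ("Finally, " ++ PySem.Str.lower z)])
      = (mid.map (fun s => "Additionally, " ++ PySem.Str.lower s)
        ++ ["Finally, " ++ PySem.Str.lower z]).map (fun s => " " ++ s) by
      rw [List.map_append, List.map_map]; rfl,
    join_fused_sep]

-- ===== VERDICT (by name: the statement is the Claim_ definition above) =====
theorem create_narrative_response_py_spec : Claim_equal_create_narrative_response_py := by
  intro sections question _
  show create_narrative_response_py sections question = create_narrative_response_py_alt sections question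
  have halt : ∀ xs : List String, create_narrative_response_py_alt xs question
      = create_narrative_response_py_alt xs "" := by intro xs; cases xs <;> rfl
  rw [halt]
  match sections with
  | [] => rfl
  | [head] =>
    show PySem.Str.join " " _ = _
    simp [create_narrative_response_py_alt, PySem.List.enumerate_cons, PySem.List.enumerate_nil,
      PySem.Str.join]
  | head :: t :: ts =>
    obtain ⟨mid, z, hmz⟩ : ∃ mid z, t :: ts = mid ++ [z] :=
      ⟨(t :: ts).dropLast, (t :: ts).getLast (by simp),
        (List.dropLast_concat_getLast (by simp)).symm⟩
    have hfg : (fun (acc : List String) (p : Int × String) =>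
        if p.1 = 0 then acc ++ [p.2]
        else if p.1 = ((head :: t :: ts).length : Int) - 1 then acc ++ ["Finally, " ++ PySem.Str.lower p.2]
        else acc ++ ["Additionally, " ++ PySem.Str.lower p.2])
        = (fun (acc : List String) (p : Int × String) =>
        acc ++ [if p.1 = 0 then p.2
          else if p.1 = ((head :: t :: ts).length : Int) - 1 then "Finally, " ++ PySem.Str.lower p.2
          else "Additionally, " ++ PySem.Str.lower p.2]) := by
      funext acc p; split_ifs <;> rfl
    simp only [create_narrative_response_py]
    rw [if_neg (by simp)]
    rw [hfg, PySem.List.foldl_append_singleton_eq_map, List.nil_append]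
    rw [show (head :: t :: ts) = head :: (mid ++ [z]) by rw [hmz]]
    rw [narrative_list_eq head mid z, ← alt_eq_join]
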